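-- pv_equiv track=rewrite | github.com/sannyy1/GOA-Homeworks | Level 072/homework/codewars2.py | sum_of_n
-- ===== SOURCE A (Python) =====
-- def sum_of_n(n):
--     result = []
--     for i in range(abs(n) + 1):
--         if n > 0:
--             result.append(i * (i + 1) // 2)
--         else:
--             result.append(-(i * (i + 1) // 2))
--     return result
-- ===== SOURCE B (Python) =====
-- def sum_of_n(n):
--     sign = 1 if n > 0 else -1
--     total = 0
--     result = []
--     for i in range(abs(n) + 1):
--         total += i
--         result.append(sign * total)
--     return result
-- ===== Notes on version B (the rewrite author's own statement) =====
-- stated objective: alternative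
-- what changed: B hoists the sign test out of the loop and builds each triangular number by running prefix-sum accumulation (total += i) instead of recomputing the per-element closed-form triangular formula with an in-loop branch.
import Mathlib
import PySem

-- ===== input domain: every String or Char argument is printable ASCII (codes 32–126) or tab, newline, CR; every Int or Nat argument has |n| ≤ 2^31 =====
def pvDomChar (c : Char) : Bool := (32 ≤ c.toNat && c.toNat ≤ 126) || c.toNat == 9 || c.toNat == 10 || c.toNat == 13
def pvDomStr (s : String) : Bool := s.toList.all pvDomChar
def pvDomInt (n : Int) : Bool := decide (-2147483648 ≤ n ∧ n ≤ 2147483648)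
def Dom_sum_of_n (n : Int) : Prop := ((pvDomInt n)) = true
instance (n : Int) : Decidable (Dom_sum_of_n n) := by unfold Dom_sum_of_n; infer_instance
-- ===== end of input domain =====

-- B hoists the sign out of the loop and accumulates triangular numbers as a running prefix sum
-- instead of the per-element closed form with an in-loop branch (alternative decomposition, same cost).


-- ===== PORT A =====
def sum_of_n (n : Int) : List Int :=
  (PySem.List.pyRange 0 ((n.natAbs : Int) + 1) 1).foldl
    (fun result i =>
      if n > 0 then result ++ [PySem.Int.floordiv (i * (i + 1)) 2]
      else result ++ [-(PySem.Int.floordiv (i * (i + 1)) 2)])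
    []

-- ===== PORT B =====
def sum_of_n_alt (n : Int) : List Int :=
  let sign : Int := if n > 0 then 1 else -1
  ((PySem.List.pyRange 0 ((n.natAbs : Int) + 1) 1).foldl
    (fun (st : Int × List Int) i => (st.1 + i, st.2 ++ [sign * (st.1 + i)]))
    (0, [])).2

-- ===== PRECONDITION & SPEC =====
def Spec_sum_of_n (n : Int) (out : List Int) : Prop := out = sum_of_n_alt n
instance (n : Int) (out : List Int) : Decidable (Spec_sum_of_n n out) := by unfold Spec_sum_of_n; infer_instance

-- ===== CLAIM (what is proved, stated in full; the proofs are below) =====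
def Claim_equal_sum_of_n : Prop := ∀ (n : Int), Dom_sum_of_n n → Spec_sum_of_n n (sum_of_n n)

-- ===== LEMMAS AND PROOFS =====

-- triangular-number step: (x-1)x//2 + x = x(x+1)//2
theorem tri_step (x : Int) :
    PySem.Int.floordiv ((x - 1) * x) 2 + x = PySem.Int.floordiv (x * (x + 1)) 2 := by
  rw [PySem.Int.floordiv_eq_ediv_of_pos (by norm_num),
      PySem.Int.floordiv_eq_ediv_of_pos (by norm_num)]
  obtain ⟨m, hm⟩ : Even ((x - 1) * ((x - 1) + 1)) := Int.even_mul_succ_self (x - 1)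
  have h1 : (x - 1) * x = 2 * m := by linear_combination hm
  have h2 : x * (x + 1) = 2 * (m + x) := by linear_combination hm
  rw [h1, h2, Int.mul_ediv_cancel_left _ (by norm_num), Int.mul_ediv_cancel_left _ (by norm_num)]

-- loop invariant: B's fold over range(k) carries total = (k-1)k//2 and builds A's list
theorem loop_agree (n : Int) (k : Nat) :
    ((PySem.List.pyRange 0 (k : Int) 1).foldl
      (fun (st : Int × List Int) i =>
        (st.1 + i, st.2 ++ [(if n > 0 then (1 : Int) else -1) * (st.1 + i)]))
      (0, [])) =
    (PySem.Int.floordiv (((k : Int) - 1) * (k : Int)) 2,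
     (PySem.List.pyRange 0 (k : Int) 1).foldl
      (fun result i =>
        if n > 0 then result ++ [PySem.Int.floordiv (i * (i + 1)) 2]
        else result ++ [-(PySem.Int.floordiv (i * (i + 1)) 2)])
      []) := by
  induction k with
  | zero => simp [PySem.List.pyRange_one_eq_nil]
  | succ k ih =>
      have hsplit : PySem.List.pyRange 0 ((k : Int) + 1) 1
          = PySem.List.pyRange 0 (k : Int) 1 ++ [(k : Int)] :=
        PySem.List.pyRange_one_succ_right (by positivity)
      push_cast
      rw [hsplit, List.foldl_append, List.foldl_append, ih]
      simp only [List.foldl_cons, List.foldl_nil, Prod.mk.injEq]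
      have h1 : ((k : Int) + 1 - 1) * ((k : Int) + 1) = (k : Int) * ((k : Int) + 1) := by ring
      constructor
      · rw [h1]; exact tri_step (k : Int)
      · rw [tri_step (k : Int)]
        split_ifs <;> simp

-- ===== VERDICT (by name: the statement is the Claim_ definition above) =====
theorem sum_of_n_spec : Claim_equal_sum_of_n := by
  intro n _
  unfold Spec_sum_of_n sum_of_n sum_of_n_alt
  have h := loop_agree n (n.natAbs + 1)
  simp only [Int.natCast_add, Int.natCast_one] at h
  exact (congrArg Prod.snd h).symm
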